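-- pv_equiv track=rewrite | github.com/karmakettle/dp-sequence-alignment | project4.py | build_scoring_matrix
-- ===== SOURCE A (Python) =====
-- def build_scoring_matrix(alphabet, diag_score, off_diag_score, dash_score):
--     """
--     Input:  set of characters alphabet, integers diag_score, off_diag_score, \
--     and dash_score.
--     Output:  dictionary of dictionaries assigning a score for each pairing \
--     of characters in the alphabet.
--     """
--     # add a dash to the alphabet
--     alphabet_with_dash = alphabet.union('-')
--
--     # create dictionary; score accessed by scoring_matrix[row_char][col_char]
--     scoring_matrix = {row_char: {} for row_char in alphabet_with_dash}
--     for row_char in alphabet_with_dash: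
--         for col_char in alphabet_with_dash:
--             if row_char == '-' or col_char == '-':
--                 score = dash_score
--             elif row_char == col_char:
--                 score = diag_score
--             else:
--                 score = off_diag_score
--             scoring_matrix[row_char][col_char] = score
--     return scoring_matrix
-- ===== SOURCE B (Python) =====
-- def build_scoring_matrix(alphabet, diag_score, off_diag_score, dash_score):
--     """Fill-then-override: default every cell to off_diag_score, then patch
--     the diagonal, then patch the dash row/column last (so '-'/'-' is dash_score)."""
--     chars = set(alphabet) | {'-'}
--     matrix = {row: {col: off_diag_score for col in chars} for row in chars}
--     for ch in chars:
--         matrix[ch][ch] = diag_score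
--     for ch in chars:
--         matrix['-'][ch] = dash_score
--         matrix[ch]['-'] = dash_score
--     return matrix
-- ===== Notes on version B (the rewrite author's own statement) =====
-- stated objective: simpler
-- what changed: Replaces the single doubly-nested loop with a three-way branch per cell by a fill-then-override decomposition: default the whole matrix to off_diag_score, patch the diagonal, then patch the dash row/column last (preserving dash precedence at '-'/'-').
import Mathlib
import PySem

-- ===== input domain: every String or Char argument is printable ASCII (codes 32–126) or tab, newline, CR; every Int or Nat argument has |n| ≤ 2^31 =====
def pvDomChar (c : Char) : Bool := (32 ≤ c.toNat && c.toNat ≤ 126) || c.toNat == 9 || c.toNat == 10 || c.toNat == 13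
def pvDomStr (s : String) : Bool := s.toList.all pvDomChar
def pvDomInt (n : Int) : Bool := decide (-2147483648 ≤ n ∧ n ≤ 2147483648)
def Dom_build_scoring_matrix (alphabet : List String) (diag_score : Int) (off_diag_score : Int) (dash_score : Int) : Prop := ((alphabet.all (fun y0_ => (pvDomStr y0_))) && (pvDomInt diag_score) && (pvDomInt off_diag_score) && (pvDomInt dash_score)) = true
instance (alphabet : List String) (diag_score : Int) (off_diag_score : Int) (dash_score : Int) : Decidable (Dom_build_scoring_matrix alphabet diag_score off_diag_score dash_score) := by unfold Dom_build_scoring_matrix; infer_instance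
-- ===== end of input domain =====

-- B replaces A's doubly-nested loop with a three-way branch per cell by a fill-then-override
-- decomposition (default everything to off_diag_score, patch the diagonal, patch dash last);
-- objective: simpler. Same return value; the Python output dict is compared ignoring order.

-- ===== PORT A =====
def build_scoring_matrix (alphabet : List String) (diag_score : Int) (off_diag_score : Int) (dash_score : Int) : List (String × List (String × Int)) :=
  -- alphabet.union('-')  (union with the one-character string '-' = the set {'-'})
  let alphabet_with_dash : PySem.Set String := PySem.Set.union (PySem.Set.ofList alphabet) ["-"]
  -- {row_char: {} for row_char in alphabet_with_dash}
  let scoring_matrix : PySem.Dict String (PySem.Dict String Int) :=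
    alphabet_with_dash.foldl (fun d row_char => d.insert row_char PySem.Dict.empty) PySem.Dict.empty
  let scoring_matrix :=
    alphabet_with_dash.foldl (fun sm row_char =>
      alphabet_with_dash.foldl (fun sm col_char =>
        let score : Int :=
          if row_char = "-" || col_char = "-" then dash_score
          else if row_char = col_char then diag_score
          else off_diag_score
        -- scoring_matrix[row_char][col_char] = score; row_char is always a key, so the
        -- Dict.empty default of modify is never used (exact for this always-present key)
        sm.modify row_char PySem.Dict.empty (fun inner => inner.insert col_char score)) sm) scoring_matrix
  scoring_matrix.items.map (fun p => (p.1, p.2.items))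

-- ===== PORT B =====
def build_scoring_matrix_alt (alphabet : List String) (diag_score : Int) (off_diag_score : Int) (dash_score : Int) : List (String × List (String × Int)) :=
  -- chars = set(alphabet) | {'-'}
  let chars : PySem.Set String := PySem.Set.union (PySem.Set.ofList alphabet) ["-"]
  -- matrix = {row: {col: off_diag_score for col in chars} for row in chars}
  let matrix : PySem.Dict String (PySem.Dict String Int) :=
    chars.foldl (fun m row =>
      m.insert row (chars.foldl (fun r col => r.insert col off_diag_score) PySem.Dict.empty)) PySem.Dict.empty
  -- for ch in chars: matrix[ch][ch] = diag_score
  let matrix :=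
    chars.foldl (fun m ch => m.modify ch PySem.Dict.empty (fun row => row.insert ch diag_score)) matrix
  -- for ch in chars: matrix['-'][ch] = dash_score; matrix[ch]['-'] = dash_score
  let matrix :=
    chars.foldl (fun m ch =>
      (m.modify "-" PySem.Dict.empty (fun row => row.insert ch dash_score)).modify ch
        PySem.Dict.empty (fun row => row.insert "-" dash_score)) matrix
  matrix.items.map (fun p => (p.1, p.2.items))

-- ===== PRECONDITION & SPEC =====
def Spec_build_scoring_matrix (alphabet : List String) (diag_score : Int) (off_diag_score : Int) (dash_score : Int) (out : List (String × List (String × Int))) : Prop := out = build_scoring_matrix_alt alphabet diag_score off_diag_score dash_score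
instance (alphabet : List String) (diag_score : Int) (off_diag_score : Int) (dash_score : Int) (out : List (String × List (String × Int))) : Decidable (Spec_build_scoring_matrix alphabet diag_score off_diag_score dash_score out) := by unfold Spec_build_scoring_matrix; infer_instance

-- ===== CLAIM (what is proved, stated in full; the proofs are below) =====
def Claim_equal_build_scoring_matrix : Prop := ∀ (alphabet : List String) (diag_score : Int) (off_diag_score : Int) (dash_score : Int), Dom_build_scoring_matrix alphabet diag_score off_diag_score dash_score → Spec_build_scoring_matrix alphabet diag_score off_diag_score dash_score (build_scoring_matrix alphabet diag_score off_diag_score dash_score)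

-- ===== LEMMAS AND PROOFS =====

-- Set.update adds nothing when every element is already present
theorem pv_update_of_subset {s : PySem.Set String} {L : List String}
    (h : ∀ x ∈ L, x ∈ s) : PySem.Set.update s L = s := by
  rw [PySem.Set.update_eq_append_filter]
  have hf : List.filter (fun y => !s.contains y) (PySem.Set.ofList L) = [] := by
    rw [List.filter_eq_nil_iff]
    intro y hy
    have hm : y ∈ s := h y ((PySem.Set.mem_ofList L y).mp hy)
    simp [hm]
  rw [hf, List.append_nil]

-- getD through a fold of inserts whose values depend only on the key
theorem pv_getD_foldl_insert {ν : Type} (L : List String) (w : String → ν)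
    (d : PySem.Dict String ν) (q : String) (d0 : ν) :
    (L.foldl (fun d x => d.insert x (w x)) d).getD q d0
      = if q ∈ L then w q else d.getD q d0 := by
  induction L generalizing d with
  | nil => simp
  | cons x L ih =>
    simp only [List.foldl_cons, ih, List.mem_cons]
    by_cases h1 : q ∈ L
    · simp [h1]
    · by_cases h2 : q = x <;> simp [h1, h2, PySem.Dict.getD_insert]

-- getD through a fold of modifies at one fixed key r
theorem pv_getD_foldl_modify_const (L : List String) (r q : String)
    (g : String → PySem.Dict String Int → PySem.Dict String Int)
    (d : PySem.Dict String (PySem.Dict String Int)) :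
    (L.foldl (fun d c => d.modify r PySem.Dict.empty (g c)) d).getD q PySem.Dict.empty
      = if q = r then L.foldl (fun inner c => g c inner) (d.getD r PySem.Dict.empty)
        else d.getD q PySem.Dict.empty := by
  induction L generalizing d with
  | nil => by_cases h : q = r <;> simp [h]
  | cons c L ih =>
    simp only [List.foldl_cons, ih, PySem.Dict.getD_modify_self]
    by_cases h : q = r
    · simp [h]
    · simp [h, PySem.Dict.getD_modify_of_ne d PySem.Dict.empty (g c) h]

-- getD through A's outer loop (row r gets its inner dict filled by v r ·)
theorem pv_getD_outerA (cs : List String) (v : String → String → Int)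
    (L : List String) (d : PySem.Dict String (PySem.Dict String Int)) (q : String)
    (hL : L.Nodup) :
    (L.foldl (fun sm r => cs.foldl
        (fun sm c => sm.modify r PySem.Dict.empty (fun inner => inner.insert c (v r c))) sm) d).getD q PySem.Dict.empty
      = if q ∈ L then cs.foldl (fun inner c => inner.insert c (v q c)) (d.getD q PySem.Dict.empty)
        else d.getD q PySem.Dict.empty := by
  induction L generalizing d with
  | nil => simp
  | cons r L ih =>
    have hnd := hL
    simp only [List.nodup_cons] at hnd
    simp only [List.foldl_cons, ih _ hnd.2, List.mem_cons]
    rw [pv_getD_foldl_modify_const cs r q]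
    by_cases h2 : q = r
    · subst h2; simp [hnd.1]
    · by_cases h1 : q ∈ L <;> simp [h1, h2]

-- keys are preserved by A's outer loop when every row key is present
theorem pv_keys_outerA (cs : List String) (v : String → String → Int)
    (L : List String) (d : PySem.Dict String (PySem.Dict String Int))
    (h : ∀ r ∈ L, r ∈ d.keys) :
    (L.foldl (fun sm r => cs.foldl
        (fun sm c => sm.modify r PySem.Dict.empty (fun inner => inner.insert c (v r c))) sm) d).keys
      = d.keys := by
  induction L generalizing d with
  | nil => simp
  | cons r L ih =>
    simp only [List.foldl_cons]
    have hk : (cs.foldl (fun sm c => sm.modify r PySem.Dict.empty (fun inner => inner.insert c (v r c))) d).keys = d.keys := by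
      rw [PySem.Dict.keys_foldl_modify_key cs (fun _ => r) PySem.Dict.empty
            (fun _ c inner => inner.insert c (v r c)) d]
      exact pv_update_of_subset (by
        intro x hx
        rcases List.mem_map.mp hx with ⟨c, _, rfl⟩
        exact h r (List.mem_cons_self ..))
    rw [ih _ (by intro x hx; rw [hk]; exact h x (List.mem_cons_of_mem _ hx)), hk]

-- getD through B's diagonal pass (modify at the loop variable's own key)
theorem pv_getD_foldl_modify_own (L : List String)
    (F : String → PySem.Dict String Int → PySem.Dict String Int)
    (d : PySem.Dict String (PySem.Dict String Int)) (q : String) (hL : L.Nodup) :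
    (L.foldl (fun m c => m.modify c PySem.Dict.empty (F c)) d).getD q PySem.Dict.empty
      = if q ∈ L then F q (d.getD q PySem.Dict.empty) else d.getD q PySem.Dict.empty := by
  induction L generalizing d with
  | nil => simp
  | cons c L ih =>
    have hnd := hL
    simp only [List.nodup_cons] at hnd
    simp only [List.foldl_cons, ih _ hnd.2, List.mem_cons]
    by_cases h1 : q ∈ L
    · have hqc : q ≠ c := fun h => hnd.1 (h ▸ h1)
      simp [h1, PySem.Dict.getD_modify_of_ne d PySem.Dict.empty (F c) hqc]
    · by_cases h2 : q = c
      · subst h2; simp [h1, PySem.Dict.getD_modify_self]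
      · simp [h1, h2, PySem.Dict.getD_modify_of_ne d PySem.Dict.empty (F c) h2]

-- getD of a non-dash row through B's dash pass: only iteration ch = q touches it
theorem pv_getD_dashpass_ne (dash_score : Int) (L : List String)
    (d : PySem.Dict String (PySem.Dict String Int)) (q : String)
    (hq : q ≠ "-") (hL : L.Nodup) :
    (L.foldl (fun m ch =>
        (m.modify "-" PySem.Dict.empty (fun row => row.insert ch dash_score)).modify ch
          PySem.Dict.empty (fun row => row.insert "-" dash_score)) d).getD q PySem.Dict.empty
      = if q ∈ L then (d.getD q PySem.Dict.empty).insert "-" dash_score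
        else d.getD q PySem.Dict.empty := by
  induction L generalizing d with
  | nil => simp
  | cons c L ih =>
    have hnd := hL
    simp only [List.nodup_cons] at hnd
    simp only [List.foldl_cons, ih _ hnd.2, List.mem_cons]
    by_cases h2 : q = c
    · subst h2
      have h1 : q ∉ L := hnd.1
      simp [h1, PySem.Dict.getD_modify_self,
            PySem.Dict.getD_modify_of_ne d PySem.Dict.empty _ hq]
    · have : ((d.modify "-" PySem.Dict.empty (fun row => row.insert c dash_score)).modify c
          PySem.Dict.empty (fun row => row.insert "-" dash_score)).getD q PySem.Dict.empty
          = d.getD q PySem.Dict.empty := by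
        rw [PySem.Dict.getD_modify_of_ne _ PySem.Dict.empty _ h2,
            PySem.Dict.getD_modify_of_ne d PySem.Dict.empty _ hq]
      by_cases h1 : q ∈ L <;> simp [h1, h2, this]
  -- getD of the dash row through B's dash pass: it collects an insert per iteration
theorem pv_getD_dashpass_dash (dash_score : Int) (L : List String)
    (d : PySem.Dict String (PySem.Dict String Int)) :
    (L.foldl (fun m ch =>
        (m.modify "-" PySem.Dict.empty (fun row => row.insert ch dash_score)).modify ch
          PySem.Dict.empty (fun row => row.insert "-" dash_score)) d).getD "-" PySem.Dict.empty
      = L.foldl (fun row c => row.insert c dash_score) (d.getD "-" PySem.Dict.empty) := by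
  induction L generalizing d with
  | nil => simp
  | cons c L ih =>
    simp only [List.foldl_cons, ih]
    congr 1
    by_cases h : c = "-"
    · subst h
      rw [PySem.Dict.getD_modify_self, PySem.Dict.getD_modify_self,
          PySem.Dict.insert_insert_self]
    · rw [PySem.Dict.getD_modify_of_ne _ PySem.Dict.empty _ (fun hh => h hh.symm),
          PySem.Dict.getD_modify_self]

-- keys are preserved by B's dash pass when '-' and every loop key are present
theorem pv_keys_dashpass (dash_score : Int) (L : List String)
    (d : PySem.Dict String (PySem.Dict String Int))
    (hdash : "-" ∈ d.keys) (h : ∀ c ∈ L, c ∈ d.keys) :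
    (L.foldl (fun m ch =>
        (m.modify "-" PySem.Dict.empty (fun row => row.insert ch dash_score)).modify ch
          PySem.Dict.empty (fun row => row.insert "-" dash_score)) d).keys = d.keys := by
  induction L generalizing d with
  | nil => simp
  | cons c L ih =>
    simp only [List.foldl_cons]
    have k1 : (d.modify "-" PySem.Dict.empty (fun row => row.insert c dash_score)).keys = d.keys := by
      rw [PySem.Dict.keys_modify, PySem.Dict.keys_insert_of_contains _ _
            ((PySem.Dict.contains_iff_mem_keys d "-").mpr hdash)]
    have k2 : ((d.modify "-" PySem.Dict.empty (fun row => row.insert c dash_score)).modify c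
          PySem.Dict.empty (fun row => row.insert "-" dash_score)).keys = d.keys := by
      rw [PySem.Dict.keys_modify, PySem.Dict.keys_insert_of_contains _ _
            (by rw [PySem.Dict.contains_iff_mem_keys, k1]; exact h c (List.mem_cons_self ..)), k1]
    rw [ih _ (by rw [k2]; exact hdash)
          (by intro x hx; rw [k2]; exact h x (List.mem_cons_of_mem _ hx)), k2]

-- the per-row equality: A's row q equals B's patched row q, for q in chars
theorem pv_row_eq (chars : List String) (diag_score off_diag_score dash_score : Int)
    (hnd : chars.Nodup) (hdash : "-" ∈ chars) (q : String) (hq : q ∈ chars) :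
    chars.foldl (fun inner c => inner.insert c
        (if q = "-" || c = "-" then dash_score
         else if q = c then diag_score else off_diag_score)) PySem.Dict.empty
      = (if q = "-"
         then chars.foldl (fun row c => row.insert c dash_score)
                ((chars.foldl (fun r col => r.insert col off_diag_score) PySem.Dict.empty).insert q diag_score)
         else ((chars.foldl (fun r col => r.insert col off_diag_score) PySem.Dict.empty).insert q
                  diag_score).insert "-" dash_score) := by
  have hrow0keys : (chars.foldl (fun r col => r.insert col off_diag_score)
      (PySem.Dict.empty : PySem.Dict String Int)).keys = chars := by
    rw [PySem.Dict.keys_foldl_insert chars (fun _ _ => off_diag_score), PySem.Dict.keys_empty,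
        PySem.Set.update_nil_left, PySem.Set.ofList_eq_self_of_nodup _ hnd]
  have hAkeys : (chars.foldl (fun inner c => inner.insert c
      (if q = "-" || c = "-" then dash_score
       else if q = c then diag_score else off_diag_score)) (PySem.Dict.empty : PySem.Dict String Int)).keys = chars := by
    rw [PySem.Dict.keys_foldl_insert chars
          (fun _ c => if q = "-" || c = "-" then dash_score else if q = c then diag_score else off_diag_score),
        PySem.Dict.keys_empty, PySem.Set.update_nil_left, PySem.Set.ofList_eq_self_of_nodup _ hnd]
  have hrowq : ((chars.foldl (fun r col => r.insert col off_diag_score)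
      (PySem.Dict.empty : PySem.Dict String Int)).insert q diag_score).keys = chars := by
    rw [PySem.Dict.keys_insert_of_contains _ _
          (by rw [PySem.Dict.contains_iff_mem_keys, hrow0keys]; exact hq), hrow0keys]
  apply PySem.Dict.ext
  by_cases hqd : q = "-"
  · subst hqd
    have hBkeys : (chars.foldl (fun row c => row.insert c dash_score)
        ((chars.foldl (fun r col => r.insert col off_diag_score) PySem.Dict.empty).insert "-" diag_score)).keys = chars := by
      rw [PySem.Dict.keys_foldl_insert chars (fun _ _ => dash_score), hrowq,
          pv_update_of_subset (fun x hx => hx)]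
    rw [if_pos rfl,
        PySem.Dict.items_eq_map_keys _ (by rw [hAkeys]; exact hnd) 0,
        PySem.Dict.items_eq_map_keys _ (by rw [hBkeys]; exact hnd) 0, hAkeys, hBkeys]
    apply List.map_congr_left
    intro c hc
    rw [pv_getD_foldl_insert, pv_getD_foldl_insert]
    simp [hc]
  · have hBkeys : (((chars.foldl (fun r col => r.insert col off_diag_score)
        (PySem.Dict.empty : PySem.Dict String Int)).insert q diag_score).insert "-" dash_score).keys = chars := by
      rw [PySem.Dict.keys_insert_of_contains _ _
            (by rw [PySem.Dict.contains_iff_mem_keys, hrowq]; exact hdash), hrowq]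
    rw [if_neg hqd,
        PySem.Dict.items_eq_map_keys _ (by rw [hAkeys]; exact hnd) 0,
        PySem.Dict.items_eq_map_keys _ (by rw [hBkeys]; exact hnd) 0, hAkeys, hBkeys]
    apply List.map_congr_left
    intro c hc
    rw [pv_getD_foldl_insert, PySem.Dict.getD_insert, PySem.Dict.getD_insert,
        pv_getD_foldl_insert]
    by_cases hcd : c = "-"
    · simp [hcd, hqd, hdash]
    · by_cases hcq : c = q
      · simp [hq, hcq, hqd]
      · simp [hc, hcd, hcq, hqd, Ne.symm hcq]

-- ===== VERDICT (by name: the statement is the Claim_ definition above) =====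
theorem build_scoring_matrix_spec : Claim_equal_build_scoring_matrix := by
  intro alphabet diag_score off_diag_score dash_score _
  unfold Spec_build_scoring_matrix build_scoring_matrix build_scoring_matrix_alt
  set chars : PySem.Set String := PySem.Set.union (PySem.Set.ofList alphabet) ["-"] with hchars
  have hnd : chars.Nodup :=
    PySem.Set.nodup_union _ _ (PySem.Set.nodup_ofList alphabet)
  have hdash : "-" ∈ chars := by
    rw [hchars, PySem.Set.mem_union]; exact Or.inr (List.mem_cons_self ..)
  -- keys of A's initial comprehension and of B's filled matrix are exactly chars
  have hinit : (chars.foldl (fun d row => d.insert row (PySem.Dict.empty : PySem.Dict String Int)) PySem.Dict.empty).keys = chars := by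
    rw [PySem.Dict.keys_foldl_insert chars (fun _ _ => PySem.Dict.empty), PySem.Dict.keys_empty,
        PySem.Set.update_nil_left, PySem.Set.ofList_eq_self_of_nodup _ hnd]
  have hm0 : (chars.foldl (fun m row =>
      m.insert row (chars.foldl (fun r col => r.insert col off_diag_score) PySem.Dict.empty)) PySem.Dict.empty).keys = chars := by
    rw [PySem.Dict.keys_foldl_insert chars
          (fun _ _ => chars.foldl (fun r col => r.insert col off_diag_score) PySem.Dict.empty),
        PySem.Dict.keys_empty, PySem.Set.update_nil_left, PySem.Set.ofList_eq_self_of_nodup _ hnd]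
  -- final keys on both sides
  have hAkeys : (chars.foldl (fun sm row =>
      chars.foldl (fun sm col => sm.modify row PySem.Dict.empty (fun inner => inner.insert col
        (if row = "-" || col = "-" then dash_score
         else if row = col then diag_score else off_diag_score))) sm)
      (chars.foldl (fun d row => d.insert row PySem.Dict.empty) PySem.Dict.empty)).keys = chars := by
    rw [pv_keys_outerA chars
          (fun row col => if row = "-" || col = "-" then dash_score
            else if row = col then diag_score else off_diag_score) chars _
          (by intro r hr; rw [hinit]; exact hr), hinit]
  have hm1 : (chars.foldl (fun m ch => m.modify ch PySem.Dict.empty (fun row => row.insert ch diag_score))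
      (chars.foldl (fun m row =>
        m.insert row (chars.foldl (fun r col => r.insert col off_diag_score) PySem.Dict.empty)) PySem.Dict.empty)).keys = chars := by
    rw [PySem.Dict.keys_foldl_modify chars PySem.Dict.empty
          (fun _ ch row => row.insert ch diag_score), hm0,
        pv_update_of_subset (fun x hx => hx)]
  have hBkeys : (chars.foldl (fun m ch =>
      (m.modify "-" PySem.Dict.empty (fun row => row.insert ch dash_score)).modify ch
        PySem.Dict.empty (fun row => row.insert "-" dash_score))
      (chars.foldl (fun m ch => m.modify ch PySem.Dict.empty (fun row => row.insert ch diag_score))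
        (chars.foldl (fun m row =>
          m.insert row (chars.foldl (fun r col => r.insert col off_diag_score) PySem.Dict.empty)) PySem.Dict.empty))).keys = chars := by
    rw [pv_keys_dashpass dash_score chars _ (by rw [hm1]; exact hdash)
          (by intro c hc; rw [hm1]; exact hc)]
    exact hm1
  -- it suffices that the two final dicts are equal
  suffices h : (chars.foldl (fun sm row =>
      chars.foldl (fun sm col => sm.modify row PySem.Dict.empty (fun inner => inner.insert col
        (if row = "-" || col = "-" then dash_score
         else if row = col then diag_score else off_diag_score))) sm)
      (chars.foldl (fun d row => d.insert row PySem.Dict.empty) PySem.Dict.empty))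
      = (chars.foldl (fun m ch =>
        (m.modify "-" PySem.Dict.empty (fun row => row.insert ch dash_score)).modify ch
          PySem.Dict.empty (fun row => row.insert "-" dash_score))
        (chars.foldl (fun m ch => m.modify ch PySem.Dict.empty (fun row => row.insert ch diag_score))
          (chars.foldl (fun m row =>
            m.insert row (chars.foldl (fun r col => r.insert col off_diag_score) PySem.Dict.empty)) PySem.Dict.empty))) by
    simp only [h]
  apply PySem.Dict.ext
  rw [PySem.Dict.items_eq_map_keys _ (by rw [hAkeys]; exact hnd) PySem.Dict.empty,
      PySem.Dict.items_eq_map_keys _ (by rw [hBkeys]; exact hnd) PySem.Dict.empty, hAkeys, hBkeys]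
  apply List.map_congr_left
  intro q hq
  -- A's row q
  rw [pv_getD_outerA chars
        (fun row col => if row = "-" || col = "-" then dash_score
          else if row = col then diag_score else off_diag_score) chars _ q hnd,
      if_pos hq, pv_getD_foldl_insert chars (fun _ => PySem.Dict.empty), if_pos hq]
  -- B's row q
  by_cases hqd : q = "-"
  · subst hqd
    rw [pv_getD_dashpass_dash dash_score chars _,
        pv_getD_foldl_modify_own chars (fun ch row => row.insert ch diag_score) _ _ hnd,
        if_pos hq,
        pv_getD_foldl_insert chars
          (fun _ => chars.foldl (fun r col => r.insert col off_diag_score) PySem.Dict.empty),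
        if_pos hq]
    have := pv_row_eq chars diag_score off_diag_score dash_score hnd hdash "-" hq
    rw [if_pos rfl] at this
    exact congrArg _ this
  · rw [pv_getD_dashpass_ne dash_score chars _ q hqd hnd, if_pos hq,
        pv_getD_foldl_modify_own chars (fun ch row => row.insert ch diag_score) _ _ hnd,
        if_pos hq,
        pv_getD_foldl_insert chars
          (fun _ => chars.foldl (fun r col => r.insert col off_diag_score) PySem.Dict.empty),
        if_pos hq]
    have := pv_row_eq chars diag_score off_diag_score dash_score hnd hdash q hq
    rw [if_neg hqd] at this
    exact congrArg _ this
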